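-- pv_equiv track=rewrite | github.com/teojusts/ZPD_pielikums2 | ZPD/Centrs_districts_sort.py | classify_addresses
-- ===== SOURCE A (Python) =====
-- def classify_addresses(listings, district_streets):
--     district_results = {
--         "Centrs2": [],
--         "Avoti": [],
--         "Skanste": [],
--         "Brasa": [],
--         "Andrejsala": []
--     }
--
--     # Go through each listing and classify by street name
--     for listing in listings:
--         address = listing.get('Address', '')  # Ensure we use the correct key 'Address'
--
--         for district, streets in district_streets.items():
--             for street in streets:
--                 if address.startswith(street):
--                     district_results[district].append(listing)
--                     break
--
--     return district_results
-- ===== SOURCE B (Python) =====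
-- def classify_addresses(listings, district_streets):
--     # Build once: exact street string -> districts tagged with that street.
--     index = {}
--     for district, streets in district_streets.items():
--         for street in streets:
--             index.setdefault(street, []).append(district)
--     results = {d: [] for d in ("Centrs2", "Avoti", "Skanste", "Brasa", "Andrejsala")}
--     # A street matches an address iff it IS one of the address's prefixes:
--     # look every prefix of the address up in the index instead of scanning all streets.
--     for listing in listings:
--         address = listing.get('Address', '')
--         matched = set()
--         for k in range(len(address) + 1):
--             matched.update(index.get(address[:k], ()))
--         for d in matched:
--             if d in results:
--                 results[d].append(listing)
--     return results
-- ===== Notes on version B (the rewrite author's own statement) =====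
-- stated objective: faster
-- what changed: B replaces A's per-listing scan over every district's whole street list with a hash index built once (exact street string -> districts tagged with it): a street matches an address iff it equals one of the address's prefixes, so B looks each prefix of the address up in the index, collects the matched districts into a set, and appends the listing to the five fixed district lists; Pre_ excludes inputs where A raises KeyError (a key outside the five districts whose street matches an address) and duplicate district keys, unrepresentable in a Python dict.
import Mathlib
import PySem

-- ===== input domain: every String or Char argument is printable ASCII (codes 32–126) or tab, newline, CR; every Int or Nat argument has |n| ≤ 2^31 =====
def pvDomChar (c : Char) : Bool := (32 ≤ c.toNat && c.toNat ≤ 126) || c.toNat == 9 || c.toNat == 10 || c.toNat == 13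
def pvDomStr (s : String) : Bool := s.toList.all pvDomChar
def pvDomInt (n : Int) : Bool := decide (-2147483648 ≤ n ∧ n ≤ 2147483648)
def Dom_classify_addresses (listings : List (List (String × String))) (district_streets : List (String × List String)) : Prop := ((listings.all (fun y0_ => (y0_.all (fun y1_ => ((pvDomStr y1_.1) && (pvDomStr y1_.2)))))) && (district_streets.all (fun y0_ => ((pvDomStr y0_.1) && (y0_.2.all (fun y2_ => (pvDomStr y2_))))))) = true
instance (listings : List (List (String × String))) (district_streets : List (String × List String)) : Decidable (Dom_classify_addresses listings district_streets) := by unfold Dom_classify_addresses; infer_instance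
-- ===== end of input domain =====

-- B builds a hash index (exact street string -> districts) once and looks up every prefix of each address, instead of A's per-listing scan over every district's whole street list (return-value equivalence only).


def pvFive : List String := ["Centrs2", "Avoti", "Skanste", "Brasa", "Andrejsala"]

-- ===== PORT A =====
-- district_results[district].append(listing): append at the FIRST occurrence of the key, none = KeyError.
def pvAppendAt : List (String × List (List (String × String))) → String → List (String × String) →
    Option (List (String × List (List (String × String))))
  | [], _, _ => none
  | (k, v) :: t, key, x =>
    if k == key then some ((k, v ++ [x]) :: t)
    else (pvAppendAt t key x).map (fun t' => (k, v) :: t')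

-- literal port of A; the inner 'for street … if startswith: append; break' is 'if any(startswith) then append once'.
-- listing.get('Address','') = first-match lookup in the association-list encoding of the dict.
def classify_addresses (listings : List (List (String × String))) (district_streets : List (String × List String)) : List (String × List (List (String × String))) :=
  (listings.foldl
    (fun acc listing =>
      district_streets.foldl
        (fun acc2 p =>
          acc2.bind (fun r =>
            if p.2.any (fun street =>
                 PySem.Str.startswith ((List.lookup "Address" listing).getD "") street)
            then pvAppendAt r p.1 listing
            else some r))
        acc)
    (some [("Centrs2", []), ("Avoti", []), ("Skanste", []), ("Brasa", []), ("Andrejsala", [])])).getD []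

-- ===== PORT B =====
-- index.setdefault(street, []).append(district), done for every (district, streets) item and street
def pvIndex (district_streets : List (String × List String)) : PySem.Dict String (List String) :=
  district_streets.foldl
    (fun dct p => p.2.foldl (fun dct street => dct.modify street [] (· ++ [p.1])) dct)
    PySem.Dict.empty

-- matched = set(); for k in range(len(address)+1): matched.update(index.get(address[:k], ()))
def pvMatchedOf (index : PySem.Dict String (List String)) (address : String) : PySem.Set String :=
  (PySem.List.pyRange 0 (PySem.Str.len address + 1) 1).foldl
    (fun m k => PySem.Set.update m (index.getD (PySem.Str.slice address none (some k)) []))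
    PySem.Set.empty

-- if d in results: results[d].append(listing)  (no-op when the key is absent)
def pvAppendIfKey : List (String × List (List (String × String))) → String → List (String × String) →
    List (String × List (List (String × String)))
  | [], _, _ => []
  | (k, v) :: t, key, x =>
    if k == key then (k, v ++ [x]) :: t
    else (k, v) :: pvAppendIfKey t key x

-- port of B; 'for d in matched' consumes the set in an order the result does not depend on
-- (each append goes to a distinct key of results), so PySem.Set's insertion order is exact here.
def classify_addresses_alt (listings : List (List (String × String))) (district_streets : List (String × List String)) : List (String × List (List (String × String))) :=
  let index := pvIndex district_streets
  listings.foldl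
    (fun results listing =>
      (pvMatchedOf index ((List.lookup "Address" listing).getD "")).foldl
        (fun r d => pvAppendIfKey r d listing)
        results)
    [("Centrs2", []), ("Avoti", []), ("Skanste", []), ("Brasa", []), ("Andrejsala", [])]

-- ===== PRECONDITION & SPEC =====
-- Pre_ excludes (a) inputs where A raises KeyError (a key outside the five fixed districts whose street
-- list matches some listing's address), and (b) duplicate district keys, unrepresentable in a Python dict.
def Pre_classify_addresses (listings : List (List (String × String))) (district_streets : List (String × List String)) : Prop :=
  (district_streets.map Prod.fst).Nodup ∧
  ∀ p ∈ district_streets, ∀ l ∈ listings,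
    p.2.any (fun street =>
      PySem.Str.startswith ((List.lookup "Address" l).getD "") street) = true →
    p.1 ∈ pvFive
instance (listings : List (List (String × String))) (district_streets : List (String × List String)) : Decidable (Pre_classify_addresses listings district_streets) := by unfold Pre_classify_addresses; infer_instance

def pvWitness_classify_addresses : (List (List (String × String))) × (List (String × List String)) :=
  ([[("Address", "Avoti iela 1")]], [("Avoti", ["Avoti"])])

def Spec_classify_addresses (listings : List (List (String × String))) (district_streets : List (String × List String)) (out : List (String × List (List (String × String)))) : Prop := out = classify_addresses_alt listings district_streets
instance (listings : List (List (String × String))) (district_streets : List (String × List String)) (out : List (String × List (List (String × String)))) : Decidable (Spec_classify_addresses listings district_streets out) := by unfold Spec_classify_addresses; infer_instance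

-- ===== CLAIM (what is proved, stated in full; the proofs are below) =====
def Claim_equal_classify_addresses : Prop := ∀ (listings : List (List (String × String))) (district_streets : List (String × List String)), Dom_classify_addresses listings district_streets → Pre_classify_addresses listings district_streets → Spec_classify_addresses listings district_streets (classify_addresses listings district_streets)

-- ===== LEMMAS AND PROOFS =====

def pvAddr (l : List (String × String)) : String := (List.lookup "Address" l).getD ""

def pvMatch (addr : String) (streets : List String) : Bool :=
  streets.any (fun street => PySem.Str.startswith addr street)

-- did any entry of ds with key k match this address?
def pvHit (ds : List (String × List String)) (addr : String) (k : String) : Bool :=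
  ds.any (fun p => p.1 == k && pvMatch addr p.2)

theorem pvHit_not_mem (ds : List (String × List String)) (addr k : String)
    (h : k ∉ ds.map Prod.fst) : pvHit ds addr k = false := by
  induction ds with
  | nil => rfl
  | cons p t ih =>
    simp only [List.map_cons, List.mem_cons, not_or] at h
    simp only [pvHit, List.any_cons] at *
    rw [ih h.2]
    have : (p.1 == k) = false := by
      simp only [beq_eq_false_iff_ne]; exact fun e => h.1 e.symm
    simp [this]

theorem pvAppendAt_eq (acc : List (String × List (List (String × String))))
    (k : String) (x : List (String × String))
    (hmem : k ∈ acc.map Prod.fst) (hnd : (acc.map Prod.fst).Nodup) :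
    pvAppendAt acc k x =
      some (acc.map (fun q => (q.1, q.2 ++ if q.1 == k then [x] else []))) := by
  induction acc with
  | nil => simp at hmem
  | cons q t ih =>
    obtain ⟨qk, qv⟩ := q
    rw [List.map_cons] at hnd hmem
    have h1 : qk ∉ t.map Prod.fst := (List.nodup_cons.mp hnd).1
    have h2 : (t.map Prod.fst).Nodup := (List.nodup_cons.mp hnd).2
    by_cases hq : qk = k
    · have hb : (qk == k) = true := by simp [hq]
      have hmap : t.map (fun p => (p.1, p.2 ++ if p.1 == k then [x] else [])) = t.map id := by
        apply List.map_congr_left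
        intro r hr
        have hrk : (r.1 == k) = false := by
          simp only [beq_eq_false_iff_ne]
          intro e
          apply h1
          rw [hq, ← e]
          exact List.mem_map_of_mem hr
        simp [hrk]
      rw [List.map_id] at hmap
      simp only [pvAppendAt, hb, if_true]
      refine congrArg some ?_
      rw [List.map_cons]
      simp only [hb, if_true]
      rw [hmap]
    · have hb : (qk == k) = false := by simp only [beq_eq_false_iff_ne]; exact hq
      have hmem' : k ∈ t.map Prod.fst := by
        rcases List.mem_cons.mp hmem with h | h
        · exact absurd h.symm hq
        · exact h
      simp [pvAppendAt, hb, hq, ih hmem' h2]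

-- one listing through A's district loop
theorem pvInner_eq (ds : List (String × List String)) (addr : String)
    (x : List (String × String))
    (acc : List (String × List (List (String × String))))
    (hnd : (acc.map Prod.fst).Nodup)
    (hds : (ds.map Prod.fst).Nodup)
    (hcov : ∀ p ∈ ds, pvMatch addr p.2 = true → p.1 ∈ acc.map Prod.fst) :
    ds.foldl
      (fun acc2 p =>
        acc2.bind (fun r =>
          if p.2.any (fun street => PySem.Str.startswith addr street)
          then pvAppendAt r p.1 x
          else some r))
      (some acc)
    = some (acc.map (fun q => (q.1, q.2 ++ if pvHit ds addr q.1 then [x] else []))) := by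
  induction ds generalizing acc with
  | nil => simp [pvHit]
  | cons p t ih =>
    rw [List.map_cons] at hds
    have hd1 : p.1 ∉ t.map Prod.fst := (List.nodup_cons.mp hds).1
    have hd2 : (t.map Prod.fst).Nodup := (List.nodup_cons.mp hds).2
    simp only [List.foldl_cons, Option.bind_some]
    by_cases hm : pvMatch addr p.2 = true
    · have hmem : p.1 ∈ acc.map Prod.fst := hcov p List.mem_cons_self hm
      rw [show (p.2.any (fun street => PySem.Str.startswith addr street)) = true from hm]
      simp only [if_true]
      rw [pvAppendAt_eq acc p.1 x hmem hnd]
      have hnd2 : ((acc.map (fun q => (q.1, q.2 ++ if q.1 == p.1 then [x] else []))).map Prod.fst).Nodup := by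
        rw [List.map_map]; exact hnd
      have hcov2 : ∀ r ∈ t, pvMatch addr r.2 = true →
          r.1 ∈ (acc.map (fun q => (q.1, q.2 ++ if q.1 == p.1 then [x] else []))).map Prod.fst := by
        intro r hr hmr
        rw [List.map_map]
        exact hcov r (List.mem_cons_of_mem _ hr) hmr
      rw [ih _ hnd2 hd2 hcov2, List.map_map]
      congr 1
      apply List.map_congr_left
      intro q _
      simp only [Function.comp]
      by_cases hq : q.1 = p.1
      · have htf : pvHit t addr p.1 = false := pvHit_not_mem t addr p.1 hd1
        have hcons : pvHit (p :: t) addr p.1 = true := by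
          simp [pvHit, List.any_cons, hm]
        simp [hq, htf, hcons]
      · have hb : (q.1 == p.1) = false := by simp only [beq_eq_false_iff_ne]; exact hq
        have hb2 : (p.1 == q.1) = false := by
          simp only [beq_eq_false_iff_ne]; exact fun e => hq e.symm
        have hstep : pvHit (p :: t) addr q.1 = pvHit t addr q.1 := by
          simp [pvHit, List.any_cons, hb2]
        simp [hb, hstep]
    · have hm' : pvMatch addr p.2 = false := by revert hm; cases pvMatch addr p.2 <;> simp
      rw [show (p.2.any (fun street => PySem.Str.startswith addr street)) = pvMatch addr p.2 from rfl]
      rw [hm']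
      simp only [Bool.false_eq_true, if_false]
      rw [ih acc hnd hd2 (fun r hr => hcov r (List.mem_cons_of_mem _ hr))]
      congr 1
      apply List.map_congr_left
      intro q _
      have hstep : pvHit (p :: t) addr q.1 = pvHit t addr q.1 := by
        simp [pvHit, List.any_cons, hm']
      simp [hstep]

-- the whole listings loop of A
theorem pvOuter_eq (ds : List (String × List String))
    (listings : List (List (String × String)))
    (acc : List (String × List (List (String × String))))
    (hnd : (acc.map Prod.fst).Nodup)
    (hds : (ds.map Prod.fst).Nodup)
    (hcov : ∀ l ∈ listings, ∀ p ∈ ds, pvMatch (pvAddr l) p.2 = true → p.1 ∈ acc.map Prod.fst) :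
    listings.foldl
      (fun acc l =>
        ds.foldl
          (fun acc2 p =>
            acc2.bind (fun r =>
              if p.2.any (fun street => PySem.Str.startswith ((List.lookup "Address" l).getD "") street)
              then pvAppendAt r p.1 l
              else some r))
          acc)
      (some acc)
    = some (acc.map (fun q =>
        (q.1, q.2 ++ listings.filter (fun l => pvHit ds (pvAddr l) q.1)))) := by
  induction listings generalizing acc with
  | nil => simp
  | cons l t ih =>
    simp only [List.foldl_cons]
    rw [show ((List.lookup "Address" l).getD "") = pvAddr l from rfl]
    rw [pvInner_eq ds (pvAddr l) l acc hnd hds (fun p hp => hcov l List.mem_cons_self p hp)]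
    have hnd2 : ((acc.map (fun q => (q.1, q.2 ++ if pvHit ds (pvAddr l) q.1 then [l] else []))).map Prod.fst).Nodup := by
      rw [List.map_map]; exact hnd
    have hcov2 : ∀ l' ∈ t, ∀ p ∈ ds, pvMatch (pvAddr l') p.2 = true →
        p.1 ∈ (acc.map (fun q => (q.1, q.2 ++ if pvHit ds (pvAddr l) q.1 then [l] else []))).map Prod.fst := by
      intro l' hl' p hp hmp
      rw [List.map_map]
      exact hcov l' (List.mem_cons_of_mem _ hl') p hp hmp
    rw [ih _ hnd2 hcov2, List.map_map]
    congr 1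
    apply List.map_congr_left
    intro q _
    simp only [Function.comp, List.filter_cons]
    by_cases hh : pvHit ds (pvAddr l) q.1 = true
    · simp [hh]
    · have : pvHit ds (pvAddr l) q.1 = false := by revert hh; cases pvHit ds (pvAddr l) q.1 <;> simp
      simp [this]

-- ---- B-side lemmas ----

theorem pv_mem_setUpdate (m : PySem.Set String) (xs : List String) (y : String) :
    y ∈ PySem.Set.update m xs ↔ y ∈ m ∨ y ∈ xs := by
  induction xs generalizing m with
  | nil => simp [PySem.Set.update]
  | cons x t ih =>
    show y ∈ PySem.Set.update (PySem.Set.add m x) t ↔ _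
    rw [ih, PySem.Set.mem_add]
    simp [or_assoc]

theorem pv_nodup_setUpdate (m : PySem.Set String) (xs : List String)
    (h : m.Nodup) : (PySem.Set.update m xs).Nodup := by
  induction xs generalizing m with
  | nil => exact h
  | cons x t ih => exact ih _ (PySem.Set.nodup_add m x h)

theorem pv_mem_foldl_update {β : Type} (l : List β) (g : β → List String)
    (m0 : PySem.Set String) (y : String) :
    y ∈ l.foldl (fun m k => PySem.Set.update m (g k)) m0 ↔ y ∈ m0 ∨ ∃ k ∈ l, y ∈ g k := by
  induction l generalizing m0 with
  | nil => simp
  | cons b t ih =>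
    simp only [List.foldl_cons]
    rw [ih, pv_mem_setUpdate]
    simp only [List.mem_cons]
    constructor
    · rintro ((h | h) | ⟨k, hk, hy⟩)
      · exact Or.inl h
      · exact Or.inr ⟨b, Or.inl rfl, h⟩
      · exact Or.inr ⟨k, Or.inr hk, hy⟩
    · rintro (h | ⟨k, (rfl | hk), hy⟩)
      · exact Or.inl (Or.inl h)
      · exact Or.inl (Or.inr hy)
      · exact Or.inr ⟨k, hk, hy⟩

theorem pv_nodup_foldl_update {β : Type} (l : List β) (g : β → List String)
    (m0 : PySem.Set String) (h : m0.Nodup) :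
    (l.foldl (fun m k => PySem.Set.update m (g k)) m0).Nodup := by
  induction l generalizing m0 with
  | nil => exact h
  | cons b t ih => exact ih _ (pv_nodup_setUpdate _ _ h)

theorem pv_nodup_matched (index : PySem.Dict String (List String)) (a : String) :
    (pvMatchedOf index a).Nodup :=
  pv_nodup_foldl_update _ _ _ List.nodup_nil

-- the index as one flat fold over (street, district) pairs
theorem pvIndex_eq_flat (ds : List (String × List String)) :
    pvIndex ds =
      (ds.flatMap (fun p => p.2.map (fun st => (st, p.1)))).foldl
        (fun dct q => dct.modify q.1 [] (· ++ [q.2])) PySem.Dict.empty := by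
  unfold pvIndex
  generalize PySem.Dict.empty = d0
  induction ds generalizing d0 with
  | nil => rfl
  | cons p t ih =>
    simp only [List.foldl_cons, List.flatMap_cons, List.foldl_append, List.foldl_map]
    exact ih _

theorem pv_mem_index (ds : List (String × List String)) (s d : String) :
    d ∈ (pvIndex ds).getD s [] ↔ ∃ p ∈ ds, s ∈ p.2 ∧ p.1 = d := by
  rw [pvIndex_eq_flat, PySem.Dict.getD_foldl_modify_append, PySem.Dict.getD_empty]
  rw [List.nil_append]
  constructor
  · intro h
    rcases List.mem_map.mp h with ⟨q, hq, hqd⟩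
    rcases List.mem_filter.mp hq with ⟨hqmem, hqs⟩
    rcases List.mem_flatMap.mp hqmem with ⟨p, hp, hqin⟩
    rcases List.mem_map.mp hqin with ⟨st, hst, rfl⟩
    refine ⟨p, hp, ?_, hqd⟩
    have hse : st = s := by simpa using hqs
    rwa [hse] at hst
  · rintro ⟨p, hp, hs, hd⟩
    exact List.mem_map.mpr ⟨(s, p.1),
      List.mem_filter.mpr ⟨List.mem_flatMap.mpr ⟨p, hp, List.mem_map.mpr ⟨s, hs, rfl⟩⟩, by simp⟩, hd⟩

-- membership in the matched set = some street of that district is a prefix of the address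
theorem pv_mem_matched (ds : List (String × List String)) (a d : String) :
    d ∈ pvMatchedOf (pvIndex ds) a ↔ pvHit ds a d = true := by
  unfold pvMatchedOf
  rw [PySem.Str.len_eq]
  have hrange : PySem.List.pyRange 0 ((a.toList.length : Int) + 1) 1
      = (List.range (a.toList.length + 1)).map (fun k => ((k : Nat) : Int)) := by
    rw [PySem.List.pyRange_one]
    have h1 : (((a.toList.length : Int) + 1) - 0).toNat = a.toList.length + 1 := by omega
    rw [h1]
    simp
  rw [hrange, List.foldl_map, pv_mem_foldl_update]
  simp only [PySem.Set.empty, List.not_mem_nil, false_or, List.mem_range]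
  unfold pvHit pvMatch
  simp only [List.any_eq_true, Bool.and_eq_true, beq_iff_eq]
  constructor
  · rintro ⟨k, hk, hmem⟩
    rcases (pv_mem_index ds _ d).mp hmem with ⟨p, hp, hs, hd⟩
    refine ⟨p, hp, hd, _, hs, ?_⟩
    rw [PySem.Str.startswith_eq, PySem.Chars.startswith_iff]
    have hsl : (PySem.Str.slice a none (some (k : Int))).toList = a.toList.take k := by
      rw [PySem.Str.toList_slice, PySem.Chars.slice_eq_listSlice, PySem.List.slice_to_natCast]
    rw [hsl]
    exact List.take_prefix k a.toList
  · rintro ⟨p, hp, hd, st, hst, hsw⟩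
    rw [PySem.Str.startswith_eq, PySem.Chars.startswith_iff] at hsw
    have hle : st.toList.length ≤ a.toList.length := hsw.length_le
    refine ⟨st.toList.length, by omega, (pv_mem_index ds _ d).mpr ⟨p, hp, ?_, hd⟩⟩
    have hkey : PySem.Str.slice a none (some (st.toList.length : Int)) = st := by
      apply String.toList_inj.mp
      rw [PySem.Str.toList_slice, PySem.Chars.slice_eq_listSlice, PySem.List.slice_to_natCast]
      exact (List.prefix_iff_eq_take.mp hsw).symm
    rw [hkey]
    exact hst

-- one append of B (total version)
theorem pvAppendIfKey_eq (acc : List (String × List (List (String × String))))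
    (d : String) (x : List (String × String))
    (hnd : (acc.map Prod.fst).Nodup) :
    pvAppendIfKey acc d x = acc.map (fun q => (q.1, q.2 ++ if q.1 = d then [x] else [])) := by
  induction acc with
  | nil => rfl
  | cons q t ih =>
    obtain ⟨qk, qv⟩ := q
    rw [List.map_cons] at hnd
    have h1 : qk ∉ t.map Prod.fst := (List.nodup_cons.mp hnd).1
    have h2 : (t.map Prod.fst).Nodup := (List.nodup_cons.mp hnd).2
    by_cases hq : qk = d
    · have hb : (qk == d) = true := by simp [hq]
      have hmap : t.map (fun p => (p.1, p.2 ++ if p.1 = d then [x] else [])) = t.map id := by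
        apply List.map_congr_left
        intro r hr
        have : r.1 ≠ d := by
          intro e; apply h1; rw [hq, ← e]; exact List.mem_map_of_mem hr
        simp [this]
      rw [List.map_id] at hmap
      simp [pvAppendIfKey, hq, hmap]
    · have hb : (qk == d) = false := by simp only [beq_eq_false_iff_ne]; exact hq
      simp [pvAppendIfKey, hb, hq, ih h2]

-- one listing of B: append it to every district of the matched set
theorem pvBInner_eq (m : List String) (x : List (String × String))
    (acc : List (String × List (List (String × String))))
    (hnd : (acc.map Prod.fst).Nodup) (hm : m.Nodup) :
    m.foldl (fun r d => pvAppendIfKey r d x) acc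
      = acc.map (fun q => (q.1, q.2 ++ if q.1 ∈ m then [x] else [])) := by
  induction m generalizing acc with
  | nil => simp
  | cons d t ih =>
    have hd1 : d ∉ t := (List.nodup_cons.mp hm).1
    have ht : t.Nodup := (List.nodup_cons.mp hm).2
    simp only [List.foldl_cons]
    rw [pvAppendIfKey_eq acc d x hnd]
    have hnd2 : ((acc.map (fun q => (q.1, q.2 ++ if q.1 = d then [x] else []))).map Prod.fst).Nodup := by
      rw [List.map_map]; exact hnd
    rw [ih _ hnd2 ht, List.map_map]
    apply List.map_congr_left
    intro q _
    simp only [Function.comp, List.mem_cons]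
    by_cases hq : q.1 = d
    · simp [hq, hd1]
    · simp [hq]

-- the whole listings loop of B
theorem pvBOuter_eq (index : PySem.Dict String (List String))
    (listings : List (List (String × String)))
    (acc : List (String × List (List (String × String))))
    (hnd : (acc.map Prod.fst).Nodup) :
    listings.foldl
      (fun results listing =>
        (pvMatchedOf index ((List.lookup "Address" listing).getD "")).foldl
          (fun r d => pvAppendIfKey r d listing)
          results)
      acc
    = acc.map (fun q =>
        (q.1, q.2 ++ listings.filter (fun l => decide (q.1 ∈ pvMatchedOf index (pvAddr l))))) := by
  induction listings generalizing acc with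
  | nil => simp
  | cons l t ih =>
    simp only [List.foldl_cons]
    rw [show ((List.lookup "Address" l).getD "") = pvAddr l from rfl]
    rw [pvBInner_eq _ l acc hnd (pv_nodup_matched index (pvAddr l))]
    have hnd2 : ((acc.map (fun q => (q.1, q.2 ++ if q.1 ∈ pvMatchedOf index (pvAddr l) then [l] else []))).map Prod.fst).Nodup := by
      rw [List.map_map]; exact hnd
    rw [ih _ hnd2, List.map_map]
    apply List.map_congr_left
    intro q _
    simp only [Function.comp, List.filter_cons]
    by_cases hh : q.1 ∈ pvMatchedOf index (pvAddr l)
    · simp [hh]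
    · simp [hh]

-- ===== VERDICT (by name: the statement is the Claim_ definition above) =====
theorem classify_addresses_spec : Claim_equal_classify_addresses := by
  intro listings ds _ hpre
  obtain ⟨hnd, hcov⟩ := hpre
  show classify_addresses listings ds = classify_addresses_alt listings ds
  have hcov' : ∀ l ∈ listings, ∀ p ∈ ds, pvMatch (pvAddr l) p.2 = true →
      p.1 ∈ ([("Centrs2", ([] : List (List (String × String)))), ("Avoti", []), ("Skanste", []),
              ("Brasa", []), ("Andrejsala", [])].map Prod.fst) := by
    intro l hl p hp hm
    have := hcov p hp l hl hm
    simpa [pvFive] using this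
  unfold classify_addresses
  rw [pvOuter_eq ds listings _ (by decide) hnd hcov']
  unfold classify_addresses_alt
  rw [pvBOuter_eq (pvIndex ds) listings _ (by decide)]
  simp only [Option.getD_some]
  apply List.map_congr_left
  intro q _
  have : listings.filter (fun l => pvHit ds (pvAddr l) q.1)
       = listings.filter (fun l => decide (q.1 ∈ pvMatchedOf (pvIndex ds) (pvAddr l))) := by
    apply List.filter_congr
    intro l _
    by_cases hc : q.1 ∈ pvMatchedOf (pvIndex ds) (pvAddr l)
    · rw [(pv_mem_matched ds (pvAddr l) q.1).mp hc]
      simp [hc]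
    · have hf : pvHit ds (pvAddr l) q.1 = false := by
        rcases hh : pvHit ds (pvAddr l) q.1
        · rfl
        · exact absurd ((pv_mem_matched ds (pvAddr l) q.1).mpr hh) hc
      rw [hf]
      simp [hc]
  rw [this]
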